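-- pv_equiv track=rewrite | github.com/catowabisabi/meow-code | api_server/services/sandbox/bash_security.py | extract_quoted_content
-- ===== SOURCE A (Python) =====
-- def extract_quoted_content(command: str, is_jq: bool = False) -> dict:
--     """
--     Extract quoted content from command, handling quotes properly.
--
--     Returns dict with:
--     - withDoubleQuotes: content with double quotes
--     - fullyUnquoted: content with all quotes stripped
--     - unquotedKeepQuoteChars: content preserving quote delimiter characters
--     """
--     with_double = ""
--     fully_unquoted = ""
--     unquoted_keep = ""
--     in_single = False
--     in_double = False
--     escaped = False
--
--     for char in command:
--         if escaped:
--             escaped = False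
--             if not in_single:
--                 with_double += char
--             if not in_single and not in_double:
--                 fully_unquoted += char
--             if not in_single and not in_double:
--                 unquoted_keep += char
--             continue
--
--         if char == "\\" and not in_single:
--             escaped = True
--             if not in_single:
--                 with_double += char
--             if not in_single and not in_double:
--                 fully_unquoted += char
--             if not in_single and not in_double:
--                 unquoted_keep += char
--             continue
--
--         if char == "'" and not in_double:
--             in_single = not in_single
--             unquoted_keep += char
--             continue
--
--         if char == '"' and not in_single:
--             in_double = not in_double
--             unquoted_keep += char
--             if not is_jq:
--                 continue
--
--         if not in_single:
--             with_double += char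
--         if not in_single and not in_double:
--             fully_unquoted += char
--         if not in_single and not in_double:
--             unquoted_keep += char
--
--     return {
--         "withDoubleQuotes": with_double,
--         "fullyUnquoted": fully_unquoted,
--         "unquotedKeepQuoteChars": unquoted_keep,
--     }
-- ===== SOURCE B (Python) =====
-- # B: lexer + three independent renderings instead of one fused triple-accumulator loop.
--
-- def _tokenize(command):
--     # One pass: classify every character into (kind, char, in_double-context).
--     # For a toggling double quote the flag is the NEW in_double (True = opening).
--     tokens = []
--     in_single = in_double = escaped = False
--     for ch in command:
--         if escaped:
--             escaped = False
--             tokens.append(("esc", ch, in_double))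
--         elif ch == "\\" and not in_single:
--             escaped = True
--             tokens.append(("bs", ch, in_double))
--         elif ch == "'" and not in_double:
--             in_single = not in_single
--             tokens.append(("sq", ch, False))
--         elif ch == '"' and not in_single:
--             in_double = not in_double
--             tokens.append(("dq", ch, in_double))
--         elif in_single:
--             tokens.append(("single", ch, in_double))
--         else:
--             tokens.append(("plain", ch, in_double))
--     return tokens
--
--
-- def _wd(is_jq, tok):
--     kind, ch, flag = tok
--     if kind == "esc" or kind == "bs" or kind == "plain":
--         return ch
--     if kind == "dq":
--         return ch if is_jq else ""
--     return ""
--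
--
-- def _fu(is_jq, tok):
--     kind, ch, flag = tok
--     if kind == "esc" or kind == "bs" or kind == "plain":
--         return "" if flag else ch
--     if kind == "dq":
--         return ch if is_jq and not flag else ""
--     return ""
--
--
-- def _uk(is_jq, tok):
--     kind, ch, flag = tok
--     if kind == "esc" or kind == "bs" or kind == "plain":
--         return "" if flag else ch
--     if kind == "sq":
--         return ch
--     if kind == "dq":
--         return ch + ch if is_jq and not flag else ch
--     return ""
--
--
-- def extract_quoted_content(command: str, is_jq: bool = False) -> dict:
--     tokens = _tokenize(command)
--     return {
--         "withDoubleQuotes": "".join(_wd(is_jq, t) for t in tokens),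
--         "fullyUnquoted": "".join(_fu(is_jq, t) for t in tokens),
--         "unquotedKeepQuoteChars": "".join(_uk(is_jq, t) for t in tokens),
--     }
-- ===== Notes on version B (the rewrite author's own statement) =====
-- stated objective: alternative
-- what changed: Replaces the fused loop that threads three growing strings through one pass with a single-pass lexer that tags each character with its quote context, followed by three independent per-token renderings joined into the three outputs.
import Mathlib
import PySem

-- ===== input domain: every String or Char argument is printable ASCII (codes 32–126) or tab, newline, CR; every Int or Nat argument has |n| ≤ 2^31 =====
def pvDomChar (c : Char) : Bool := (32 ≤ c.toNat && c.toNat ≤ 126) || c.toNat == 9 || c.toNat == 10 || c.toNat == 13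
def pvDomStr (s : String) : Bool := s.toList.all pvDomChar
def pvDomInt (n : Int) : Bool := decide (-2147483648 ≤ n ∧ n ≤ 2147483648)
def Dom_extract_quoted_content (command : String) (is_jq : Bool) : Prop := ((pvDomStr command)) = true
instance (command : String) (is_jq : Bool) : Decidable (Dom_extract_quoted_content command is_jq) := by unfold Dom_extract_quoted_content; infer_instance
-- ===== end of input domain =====

-- B replaces A's fused triple-accumulator loop with a one-pass lexer plus three
-- independent per-token renderings (objective: alternative decomposition, same cost).

-- ===== PORT A =====
-- A's single loop, carrying the three accumulators and the three flags as state.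
def eqcLoopA (is_jq : Bool) : List Char → List Char → List Char → List Char → Bool → Bool → Bool → (List Char × List Char × List Char)
  | [], wd, fu, uk, _, _, _ => (wd, fu, uk)
  | c :: cs, wd, fu, uk, ins, ind, esc =>
    if esc then
      eqcLoopA is_jq cs
        (if !ins then wd ++ [c] else wd)
        (if !ins && !ind then fu ++ [c] else fu)
        (if !ins && !ind then uk ++ [c] else uk)
        ins ind false
    else if c == '\\' && !ins then
      eqcLoopA is_jq cs
        (if !ins then wd ++ [c] else wd)
        (if !ins && !ind then fu ++ [c] else fu)
        (if !ins && !ind then uk ++ [c] else uk)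
        ins ind true
    else if c == '\'' && !ind then
      eqcLoopA is_jq cs wd fu (uk ++ [c]) (!ins) ind esc
    else if c == '"' && !ins then
      -- toggle in_double, keep the quote char; fall through to the tail appends only when is_jq
      if is_jq then
        eqcLoopA is_jq cs
          (if !ins then wd ++ [c] else wd)
          (if !ins && !(!ind) then fu ++ [c] else fu)
          (if !ins && !(!ind) then (uk ++ [c]) ++ [c] else uk ++ [c])
          ins (!ind) esc
      else
        eqcLoopA is_jq cs wd fu (uk ++ [c]) ins (!ind) esc
    else
      eqcLoopA is_jq cs
        (if !ins then wd ++ [c] else wd)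
        (if !ins && !ind then fu ++ [c] else fu)
        (if !ins && !ind then uk ++ [c] else uk)
        ins ind esc

def extract_quoted_content (command : String) (is_jq : Bool) : List (String × String) :=
  let r := eqcLoopA is_jq command.toList [] [] [] false false false
  [("withDoubleQuotes", String.ofList r.1),
   ("fullyUnquoted", String.ofList r.2.1),
   ("unquotedKeepQuoteChars", String.ofList r.2.2)]

-- ===== PORT B =====
-- B's lexer: one pass tagging every character as ("kind", char, in_double-context);
-- for a toggling double quote the flag is the NEW in_double (true = opening).
def eqcTokenize : List Char → Bool → Bool → Bool → List (String × Char × Bool)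
  | [], _, _, _ => []
  | c :: cs, ins, ind, esc =>
    if esc then ("esc", c, ind) :: eqcTokenize cs ins ind false
    else if c == '\\' && !ins then ("bs", c, ind) :: eqcTokenize cs ins ind true
    else if c == '\'' && !ind then ("sq", c, false) :: eqcTokenize cs (!ins) ind false
    else if c == '"' && !ins then ("dq", c, !ind) :: eqcTokenize cs ins (!ind) false
    else if ins then ("single", c, ind) :: eqcTokenize cs ins ind false
    else ("plain", c, ind) :: eqcTokenize cs ins ind false

def eqcWd (is_jq : Bool) (t : String × Char × Bool) : List Char :=
  let (kind, ch, _) := t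
  if kind == "esc" || kind == "bs" || kind == "plain" then [ch]
  else if kind == "dq" then (if is_jq then [ch] else [])
  else []

def eqcFu (is_jq : Bool) (t : String × Char × Bool) : List Char :=
  let (kind, ch, flag) := t
  if kind == "esc" || kind == "bs" || kind == "plain" then (if flag then [] else [ch])
  else if kind == "dq" then (if is_jq && !flag then [ch] else [])
  else []

def eqcUk (is_jq : Bool) (t : String × Char × Bool) : List Char :=
  let (kind, ch, flag) := t
  if kind == "esc" || kind == "bs" || kind == "plain" then (if flag then [] else [ch])
  else if kind == "sq" then [ch]
  else if kind == "dq" then (if is_jq && !flag then [ch, ch] else [ch])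
  else []

def extract_quoted_content_alt (command : String) (is_jq : Bool) : List (String × String) :=
  let tokens := eqcTokenize command.toList false false false
  [("withDoubleQuotes", String.ofList (tokens.flatMap (eqcWd is_jq))),
   ("fullyUnquoted", String.ofList (tokens.flatMap (eqcFu is_jq))),
   ("unquotedKeepQuoteChars", String.ofList (tokens.flatMap (eqcUk is_jq)))]

-- ===== PRECONDITION & SPEC =====
def Spec_extract_quoted_content (command : String) (is_jq : Bool) (out : List (String × String)) : Prop := out = extract_quoted_content_alt command is_jq
instance (command : String) (is_jq : Bool) (out : List (String × String)) : Decidable (Spec_extract_quoted_content command is_jq out) := by unfold Spec_extract_quoted_content; infer_instance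

-- ===== CLAIM (what is proved, stated in full; the proofs are below) =====
def Claim_equal_extract_quoted_content : Prop := ∀ (command : String) (is_jq : Bool), Dom_extract_quoted_content command is_jq → Spec_extract_quoted_content command is_jq (extract_quoted_content command is_jq)

-- ===== LEMMAS AND PROOFS =====

-- Invariant: `escaped` is only ever set while outside single quotes, so A's loop state
-- is exactly "accumulators ++ the three renderings of the remaining tokens".
theorem eqcLoop_eq_render (is_jq : Bool) :
    ∀ (cs wd fu uk : List Char) (ins ind esc : Bool), (esc = true → ins = false) →
      eqcLoopA is_jq cs wd fu uk ins ind esc =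
        (wd ++ (eqcTokenize cs ins ind esc).flatMap (eqcWd is_jq),
         fu ++ (eqcTokenize cs ins ind esc).flatMap (eqcFu is_jq),
         uk ++ (eqcTokenize cs ins ind esc).flatMap (eqcUk is_jq)) := by
  intro cs
  induction cs with
  | nil => intro wd fu uk ins ind esc _; simp [eqcLoopA, eqcTokenize]
  | cons c cs ih =>
    intro wd fu uk ins ind esc hesc
    by_cases he : esc = true
    · have hins : ins = false := hesc he
      subst he hins
      simp [eqcLoopA, eqcTokenize]
      rw [ih _ _ _ false _ false (by simp)]
      cases ind <;> simp [eqcWd, eqcFu, eqcUk]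
    · have he' : esc = false := by cases esc <;> simp_all
      subst he'
      by_cases hbs : (c == '\\' && !ins) = true
      · have hins : ins = false := by cases ins <;> simp_all
        subst hins
        have hc : c = '\\' := by simpa using hbs
        subst hc
        simp [eqcLoopA, eqcTokenize]
        rw [ih _ _ _ false _ true (by simp)]
        cases ind <;> simp [eqcWd, eqcFu, eqcUk]
      · by_cases hsq : (c == '\'' && !ind) = true
        · have hind : ind = false := by cases ind <;> simp_all
          subst hind
          have hc : c = '\'' := by simpa using hsq
          subst hc
          simp [eqcLoopA, eqcTokenize]
          rw [ih _ _ _ (!ins) false false (by simp)]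
          simp [eqcWd, eqcFu, eqcUk]
        · by_cases hdq : (c == '"' && !ins) = true
          · have hins : ins = false := by cases ins <;> simp_all
            subst hins
            have hc : c = '"' := by simpa using hdq
            subst hc
            cases is_jq <;>
              · simp [eqcLoopA, eqcTokenize]
                rw [ih _ _ _ false _ false (by simp)]
                cases ind <;> simp [eqcWd, eqcFu, eqcUk]
          · cases ins with
            | false =>
                have hb : ¬ c = '\\' := by simpa using hbs
                have hd : ¬ c = '"' := by simpa using hdq
                cases ind with
                | false =>
                    have hs : ¬ c = '\'' := by simpa using hsq
                    simp [eqcLoopA, eqcTokenize, hb, hs, hd]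
                    rw [ih _ _ _ false false false (by simp)]
                    simp [eqcWd, eqcFu, eqcUk]
                | true =>
                    simp [eqcLoopA, eqcTokenize, hb, hd]
                    rw [ih _ _ _ false true false (by simp)]
                    simp [eqcWd, eqcFu, eqcUk]
            | true =>
                cases ind with
                | false =>
                    have hs : ¬ c = '\'' := by simpa using hsq
                    simp [eqcLoopA, eqcTokenize, hs]
                    rw [ih _ _ _ true false false (by simp)]
                    simp [eqcWd, eqcFu, eqcUk]
                | true =>
                    simp [eqcLoopA, eqcTokenize]
                    rw [ih _ _ _ true true false (by simp)]
                    simp [eqcWd, eqcFu, eqcUk]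

-- ===== VERDICT (by name: the statement is the Claim_ definition above) =====
theorem extract_quoted_content_spec : Claim_equal_extract_quoted_content := by
  intro command is_jq _
  unfold Spec_extract_quoted_content extract_quoted_content extract_quoted_content_alt
  rw [eqcLoop_eq_render is_jq command.toList [] [] [] false false false (by simp)]
  simp
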